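-- pv_equiv track=rewrite | github.com/liningtonlab/relationext | src/compound_name_extractor.py | match_root_name_in_abstract
-- ===== SOURCE A (Python) =====
-- def match_root_name_in_abstract(abstract_text, root_name_list):
--
--     match_res = [comp for comp in root_name_list if(comp in abstract_text)]
--     if match_res:
--         match_res = list(set([x.capitalize() for x in match_res]))
--         match_res.sort()
--         return match_res
--     else:
--         return []
-- ===== SOURCE B (Python) =====
-- def match_root_name_in_abstract(abstract_text, root_name_list):
--     # One pass: insert each matching name's capitalized form into a
--     # sorted, duplicate-free result list as we go (no set, no final sort).
--     res = []
--     for comp in root_name_list: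
--         if abstract_text.find(comp) != -1:
--             cap = comp.capitalize()
--             res = _insert_sorted_unique(res, cap)
--     return res
--
--
-- def _insert_sorted_unique(res, x):
--     for i, y in enumerate(res):
--         if x == y:
--             return res
--         if x < y:
--             return res[:i] + [x] + res[i:]
--     return res + [x]
-- ===== Notes on version B (the rewrite author's own statement) =====
-- stated objective: alternative
-- what changed: Replaces the filter -> capitalize -> set -> sort pipeline by a single pass that inserts each matching name's capitalized form into a sorted duplicate-free accumulator (substring test via str.find instead of 'in').
import Mathlib
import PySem

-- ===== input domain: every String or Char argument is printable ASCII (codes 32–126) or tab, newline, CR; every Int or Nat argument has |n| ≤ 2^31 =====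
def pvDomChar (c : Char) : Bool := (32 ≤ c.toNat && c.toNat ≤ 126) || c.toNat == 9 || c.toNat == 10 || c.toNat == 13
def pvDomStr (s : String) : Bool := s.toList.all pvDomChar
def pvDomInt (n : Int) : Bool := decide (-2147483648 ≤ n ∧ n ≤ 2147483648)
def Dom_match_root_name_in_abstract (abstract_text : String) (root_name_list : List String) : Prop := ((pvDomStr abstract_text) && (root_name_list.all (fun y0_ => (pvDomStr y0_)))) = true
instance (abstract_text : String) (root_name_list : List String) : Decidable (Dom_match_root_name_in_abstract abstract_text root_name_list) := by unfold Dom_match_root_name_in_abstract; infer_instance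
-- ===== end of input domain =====

-- B replaces A's filter -> capitalize -> set -> sort pipeline by a single pass
-- inserting each matching name's capitalized form into a sorted duplicate-free
-- accumulator (alternative decomposition, similar cost).


-- shared helper: Python str.capitalize (exact on ASCII: first char upper, rest lower)
def pyCapitalize (s : String) : String :=
  match s.toList with
  | [] => s
  | c :: rest => String.ofList (PySem.Chars.upperChar c :: PySem.Chars.lower rest)

-- ===== PORT A =====
def match_root_name_in_abstract (abstract_text : String) (root_name_list : List String) : List String :=
  let match_res := root_name_list.filter (fun comp => PySem.Str.isIn comp abstract_text)
  if match_res ≠ [] then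
    -- list(set(...)) followed by .sort(): sorted distinct capitalized matches
    PySem.List.sorted (PySem.Set.ofList (match_res.map (fun x => pyCapitalize x))) (fun x => x) false
  else []

-- ===== PORT B =====
-- _insert_sorted_unique from Source B: scan a sorted list, keep it duplicate-free
def insertSortedUnique : List String → String → List String
  | [], x => [x]
  | y :: ys, x => if x = y then y :: ys else if x < y then x :: y :: ys else y :: insertSortedUnique ys x

def match_root_name_in_abstract_alt (abstract_text : String) (root_name_list : List String) : List String :=
  root_name_list.foldl
    (fun res comp =>
      if PySem.Str.find abstract_text comp ≠ -1 then insertSortedUnique res (pyCapitalize comp) else res)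
    []

-- ===== PRECONDITION & SPEC =====
def Spec_match_root_name_in_abstract (abstract_text : String) (root_name_list : List String) (out : List String) : Prop := out = match_root_name_in_abstract_alt abstract_text root_name_list
instance (abstract_text : String) (root_name_list : List String) (out : List String) : Decidable (Spec_match_root_name_in_abstract abstract_text root_name_list out) := by unfold Spec_match_root_name_in_abstract; infer_instance

-- ===== CLAIM (what is proved, stated in full; the proofs are below) =====
def Claim_equal_match_root_name_in_abstract : Prop := ∀ (abstract_text : String) (root_name_list : List String), Dom_match_root_name_in_abstract abstract_text root_name_list → Spec_match_root_name_in_abstract abstract_text root_name_list (match_root_name_in_abstract abstract_text root_name_list)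

-- ===== LEMMAS AND PROOFS =====

theorem mem_insertSortedUnique (res : List String) (x z : String) :
    z ∈ insertSortedUnique res x ↔ z = x ∨ z ∈ res := by
  induction res with
  | nil => simp [insertSortedUnique]
  | cons y ys ih =>
    simp only [insertSortedUnique]
    split_ifs with h1 h2
    · subst h1; simp [List.mem_cons]
    · simp [List.mem_cons]
    · simp [List.mem_cons, ih]; tauto

theorem pairwise_insertSortedUnique (res : List String) (x : String)
    (h : res.Pairwise (· < ·)) : (insertSortedUnique res x).Pairwise (· < ·) := by
  induction res with
  | nil => simp [insertSortedUnique]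
  | cons y ys ih =>
    rcases List.pairwise_cons.mp h with ⟨hy, hys⟩
    simp only [insertSortedUnique]
    split_ifs with h1 h2
    · exact h
    · exact List.pairwise_cons.mpr ⟨by
        intro z hz
        rcases List.mem_cons.mp hz with rfl | hz'
        · exact h2
        · exact lt_trans h2 (hy z hz'), h⟩
    · refine List.pairwise_cons.mpr ⟨?_, ih hys⟩
      intro z hz
      rcases (mem_insertSortedUnique ys x z).mp hz with rfl | hz'
      · exact lt_of_le_of_ne (not_lt.mp h2) (Ne.symm h1)
      · exact hy z hz'

theorem cond_eq (a c : String) :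
    (PySem.Str.find a c ≠ -1) ↔ PySem.Str.isIn c a = true := by
  rw [PySem.Str.find_ne_neg_one_iff, PySem.Str.isIn_iff_infix]

theorem fold_mem (a : String) (l : List String) (res : List String) (z : String) :
    z ∈ l.foldl (fun res comp =>
        if PySem.Str.find a comp ≠ -1 then insertSortedUnique res (pyCapitalize comp) else res) res ↔
      z ∈ res ∨ ∃ c ∈ l, PySem.Str.isIn c a = true ∧ z = pyCapitalize c := by
  induction l generalizing res with
  | nil => simp
  | cons c cs ih =>
    simp only [List.foldl_cons, ih]
    by_cases hc : PySem.Str.find a c ≠ -1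
    · simp only [if_pos hc, mem_insertSortedUnique]
      constructor
      · rintro (⟨rfl | hz⟩ | h)
        · exact Or.inr ⟨c, by simp, (cond_eq a c).mp hc, rfl⟩
        · exact Or.inl hz
        · rcases h with ⟨d, hd, hp, hz⟩; exact Or.inr ⟨d, by simp [hd], hp, hz⟩
      · rintro (hz | ⟨d, hd, hp, hz⟩)
        · exact Or.inl (Or.inr hz)
        · rcases List.mem_cons.mp hd with rfl | hd'
          · exact Or.inl (Or.inl hz)
          · exact Or.inr ⟨d, hd', hp, hz⟩
    · simp only [if_neg hc]
      constructor
      · rintro (hz | ⟨d, hd, hp, hz⟩)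
        · exact Or.inl hz
        · exact Or.inr ⟨d, by simp [hd], hp, hz⟩
      · rintro (hz | ⟨d, hd, hp, hz⟩)
        · exact Or.inl hz
        · rcases List.mem_cons.mp hd with rfl | hd'
          · exact absurd ((cond_eq a d).mpr hp) hc
          · exact Or.inr ⟨d, hd', hp, hz⟩

theorem fold_pairwise (a : String) (l : List String) (res : List String)
    (h : res.Pairwise (· < ·)) :
    (l.foldl (fun res comp =>
        if PySem.Str.find a comp ≠ -1 then insertSortedUnique res (pyCapitalize comp) else res) res).Pairwise (· < ·) := by
  induction l generalizing res with
  | nil => exact h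
  | cons c cs ih =>
    simp only [List.foldl_cons]
    split_ifs with hc
    · exact ih _ (pairwise_insertSortedUnique _ _ h)
    · exact ih _ h

theorem alt_eq_sorted (a : String) (l : List String) :
    PySem.List.sorted
      (PySem.Set.ofList ((l.filter (fun comp => PySem.Str.isIn comp a)).map (fun x => pyCapitalize x)))
      (fun x => x) false = match_root_name_in_abstract_alt a l := by
  apply PySem.List.sorted_eq_of_perm_of_pairwise_lt
  · have hn1 : (match_root_name_in_abstract_alt a l).Nodup :=
      (fold_pairwise a l [] (by simp)).imp (fun h => ne_of_lt h)
    have hn2 := PySem.Set.nodup_ofList ((l.filter (fun comp => PySem.Str.isIn comp a)).map (fun x => pyCapitalize x))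
    rw [List.perm_ext_iff_of_nodup hn1 hn2]
    intro z
    rw [PySem.Set.mem_ofList]
    unfold match_root_name_in_abstract_alt
    rw [fold_mem]
    simp only [List.mem_map, List.mem_filter, List.not_mem_nil, false_or]
    constructor
    · rintro ⟨c, hc, hp, rfl⟩; exact ⟨c, ⟨hc, hp⟩, rfl⟩
    · rintro ⟨c, ⟨hc, hp⟩, rfl⟩; exact ⟨c, hc, hp, rfl⟩
  · exact fold_pairwise a l [] (by simp)

-- ===== VERDICT (by name: the statement is the Claim_ definition above) =====
theorem match_root_name_in_abstract_spec : Claim_equal_match_root_name_in_abstract := by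
  intro a l _
  unfold Spec_match_root_name_in_abstract match_root_name_in_abstract
  simp only
  split_ifs with h
  · exact alt_eq_sorted a l
  · rw [← alt_eq_sorted a l]
    simp only [not_not] at h
    rw [h]
    rfl
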